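-- pv_equiv track=rewrite | github.com/vrbart/Q-Base-by-MVS-Final | src/ccbs_app/ai3/evolution.py | variant_rank_from_id
-- ===== SOURCE A (Python) =====
-- def variant_rank_from_id(variant_id: str) -> int:
--     raw = str(variant_id or "").strip().lower().replace("-", "_")
--     if not raw:
--         return 1
--     checks = [
--         (5, {"e", "mythic", "legend", "l6", "s6", "stage6"}),
--         (4, {"d", "rare", "l5", "s5", "stage5"}),
--         (3, {"c", "elite", "l4", "s4", "stage4"}),
--         (2, {"b", "evolved", "l3", "s3", "stage3"}),
--         (1, {"a", "base", "l2", "s2", "stage2"}),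
--     ]
--     parts = {raw}
--     parts.update(p for p in raw.split("_") if p)
--     for rank, tags in checks:
--         if parts & tags:
--             return rank
--     return 1
-- ===== SOURCE B (Python) =====
-- _GROUPS = (
--     (5, ("e", "mythic", "legend", "l6", "s6", "stage6")),
--     (4, ("d", "rare", "l5", "s5", "stage5")),
--     (3, ("c", "elite", "l4", "s4", "stage4")),
--     (2, ("b", "evolved", "l3", "s3", "stage3")),
--     (1, ("a", "base", "l2", "s2", "stage2")),
-- )
-- _TAG_TO_RANK = {tag: rank for rank, tags in _GROUPS for tag in tags}
--
--
-- def variant_rank_from_id(variant_id: str) -> int: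
--     raw = str(variant_id or "").strip().lower().replace("-", "_")
--     if not raw:
--         return 1
--     best = 1
--     for p in [raw, *raw.split("_")]:
--         best = max(best, _TAG_TO_RANK.get(p, 1))
--     return best
-- ===== Notes on version B (the rewrite author's own statement) =====
-- stated objective: alternative
-- what changed: Replaces the descending scan over five (rank, tag-set) pairs with set intersections by a single flat tag-to-rank dict built once plus one running-max pass over the parts (valid because the tag groups are disjoint, so the max matched rank equals the first-highest intersecting group).
import Mathlib
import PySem

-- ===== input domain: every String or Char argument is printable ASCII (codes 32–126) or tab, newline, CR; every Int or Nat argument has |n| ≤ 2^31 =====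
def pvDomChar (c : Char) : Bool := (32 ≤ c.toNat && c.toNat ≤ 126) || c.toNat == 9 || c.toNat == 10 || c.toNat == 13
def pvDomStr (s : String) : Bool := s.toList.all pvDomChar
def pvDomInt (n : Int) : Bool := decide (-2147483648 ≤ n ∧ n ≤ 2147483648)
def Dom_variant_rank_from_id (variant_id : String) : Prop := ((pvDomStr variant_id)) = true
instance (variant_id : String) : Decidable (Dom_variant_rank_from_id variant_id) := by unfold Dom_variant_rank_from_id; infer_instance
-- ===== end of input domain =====

-- B changes the algorithm only (one flat tag→rank dict + running max instead of a descending scan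
-- with set intersections); same result, similar cost ("alternative", no speed claim).

-- the five tag groups (shared literal data of both programs)
def pvT5 : List String := ["e", "mythic", "legend", "l6", "s6", "stage6"]
def pvT4 : List String := ["d", "rare", "l5", "s5", "stage5"]
def pvT3 : List String := ["c", "elite", "l4", "s4", "stage4"]
def pvT2 : List String := ["b", "evolved", "l3", "s3", "stage3"]
def pvT1 : List String := ["a", "base", "l2", "s2", "stage2"]

-- ===== PORT A =====
-- checks = [(5, {...}), ...]
def pvChecks : List (Int × PySem.Set String) :=
  [(5, PySem.Set.ofList pvT5), (4, PySem.Set.ofList pvT4), (3, PySem.Set.ofList pvT3),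
   (2, PySem.Set.ofList pvT2), (1, PySem.Set.ofList pvT1)]

-- 'for rank, tags in checks: if parts & tags: return rank' / fallthrough 'return 1'
def pvALoop (parts : PySem.Set String) : List (Int × PySem.Set String) → Int
  | [] => 1
  | (rank, tags) :: rest =>
      if PySem.Set.inter parts tags ≠ [] then rank else pvALoop parts rest

def variant_rank_from_id (variant_id : String) : Int :=
  -- raw = str(variant_id or "").strip().lower().replace("-", "_")
  let raw := PySem.Str.replace
      (PySem.Str.lower (PySem.Str.strip (if variant_id = "" then "" else variant_id))) "-" "_"
  if raw = "" then 1
  else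
    -- parts = {raw}; parts.update(p for p in raw.split("_") if p)
    let parts := PySem.Set.update (PySem.Set.ofList [raw])
      (((PySem.Str.split? raw "_").getD []).filter (fun p => p != ""))
    pvALoop parts pvChecks

-- ===== PORT B =====
def pvGroups : List (Int × List String) := [(5, pvT5), (4, pvT4), (3, pvT3), (2, pvT2), (1, pvT1)]

-- _TAG_TO_RANK = {tag: rank for rank, tags in _GROUPS for tag in tags}
def pvTagToRank : PySem.Dict String Int :=
  pvGroups.foldl (fun d g => g.2.foldl (fun d t => d.insert t g.1) d) PySem.Dict.empty

def variant_rank_from_id_alt (variant_id : String) : Int :=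
  let raw := PySem.Str.replace
      (PySem.Str.lower (PySem.Str.strip (if variant_id = "" then "" else variant_id))) "-" "_"
  if raw = "" then 1
  else
    -- best = 1; for p in [raw, *raw.split("_")]: best = max(best, _TAG_TO_RANK.get(p, 1))
    (raw :: (PySem.Str.split? raw "_").getD []).foldl
      (fun b p => max b (pvTagToRank.getD p 1)) 1

-- ===== PRECONDITION & SPEC =====
def Spec_variant_rank_from_id (variant_id : String) (out : Int) : Prop := out = variant_rank_from_id_alt variant_id
instance (variant_id : String) (out : Int) : Decidable (Spec_variant_rank_from_id variant_id out) := by unfold Spec_variant_rank_from_id; infer_instance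

-- ===== CLAIM (what is proved, stated in full; the proofs are below) =====
def Claim_equal_variant_rank_from_id : Prop := ∀ (variant_id : String), Dom_variant_rank_from_id variant_id → Spec_variant_rank_from_id variant_id (variant_rank_from_id variant_id)

-- ===== LEMMAS AND PROOFS =====

-- common characterisation: rank of the highest group any element of Q belongs to
def pvRankMax (Q : List String) : Int :=
  if Q.any (fun p => decide (p ∈ pvT5)) then 5
  else if Q.any (fun p => decide (p ∈ pvT4)) then 4
  else if Q.any (fun p => decide (p ∈ pvT3)) then 3
  else if Q.any (fun p => decide (p ∈ pvT2)) then 2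
  else 1

lemma pvInter_ne_nil (Q T : List String) :
    (PySem.Set.inter (PySem.Set.ofList Q) (PySem.Set.ofList T) ≠ []) ↔
      Q.any (fun p => decide (p ∈ T)) = true := by
  rw [Ne, List.eq_nil_iff_forall_not_mem, List.any_eq_true]
  push Not
  constructor
  · rintro ⟨x, hx⟩
    have := (PySem.Set.mem_inter _ _ _).1 hx
    exact ⟨x, (PySem.Set.mem_ofList _ _).1 this.1, by simpa using (PySem.Set.mem_ofList _ _).1 this.2⟩
  · rintro ⟨x, hxQ, hxT⟩
    exact ⟨x, (PySem.Set.mem_inter _ _ _).2 ⟨(PySem.Set.mem_ofList _ _).2 hxQ,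
      (PySem.Set.mem_ofList _ _).2 (by simpa using hxT)⟩⟩

lemma pvALoop_eq_rankMax (Q : List String) :
    pvALoop (PySem.Set.ofList Q) pvChecks = pvRankMax Q := by
  simp only [pvChecks, pvALoop, pvRankMax]
  by_cases h5 : (PySem.Set.inter (PySem.Set.ofList Q) (PySem.Set.ofList pvT5) ≠ []) <;>
  by_cases h4 : (PySem.Set.inter (PySem.Set.ofList Q) (PySem.Set.ofList pvT4) ≠ []) <;>
  by_cases h3 : (PySem.Set.inter (PySem.Set.ofList Q) (PySem.Set.ofList pvT3) ≠ []) <;>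
  by_cases h2 : (PySem.Set.inter (PySem.Set.ofList Q) (PySem.Set.ofList pvT2) ≠ []) <;>
  by_cases h1 : (PySem.Set.inter (PySem.Set.ofList Q) (PySem.Set.ofList pvT1) ≠ []) <;>
    simp [h5, h4, h3, h2, h1,
      (pvInter_ne_nil Q pvT5).symm, (pvInter_ne_nil Q pvT4).symm,
      (pvInter_ne_nil Q pvT3).symm, (pvInter_ne_nil Q pvT2).symm]

lemma pvRankMax_pos (Q : List String) : 1 ≤ pvRankMax Q := by
  unfold pvRankMax; split_ifs <;> norm_num

lemma pvRankMax_le (Q : List String) : pvRankMax Q ≤ 5 := by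
  unfold pvRankMax; split_ifs <;> norm_num

lemma pvGetD_top (p : String) (h : p ∈ pvT5) : pvTagToRank.getD p 1 = 5 := by
  fin_cases h <;> decide

lemma pvGetD_4 (p : String) (h : p ∈ pvT4) : pvTagToRank.getD p 1 = 4 := by
  fin_cases h <;> decide

lemma pvGetD_3 (p : String) (h : p ∈ pvT3) : pvTagToRank.getD p 1 = 3 := by
  fin_cases h <;> decide

lemma pvGetD_2 (p : String) (h : p ∈ pvT2) : pvTagToRank.getD p 1 = 2 := by
  fin_cases h <;> decide

lemma pvGetD_low (p : String) (h5 : p ∉ pvT5) (h4 : p ∉ pvT4) (h3 : p ∉ pvT3) (h2 : p ∉ pvT2) :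
    pvTagToRank.getD p 1 = 1 := by
  by_cases h1 : p ∈ pvT1
  · fin_cases h1 <;> decide
  · apply PySem.Dict.getD_of_not_contains
    have hk : pvTagToRank.keys = pvT5 ++ pvT4 ++ pvT3 ++ pvT2 ++ pvT1 := by decide
    rw [PySem.Dict.contains_eq_decide_mem_keys, hk]
    simp only [List.mem_append, decide_eq_false_iff_not]
    tauto

-- the running-max loop computes pvRankMax
lemma pvFold_eq (Q : List String) (a : Int) (ha : 1 ≤ a) :
    Q.foldl (fun b p => max b (pvTagToRank.getD p 1)) a = max a (pvRankMax Q) := by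
  induction Q generalizing a with
  | nil => simp [pvRankMax]; omega
  | cons p Q ih =>
    simp only [List.foldl_cons]
    rw [ih (max a (pvTagToRank.getD p 1)) (le_trans ha (le_max_left _ _))]
    have hpos := pvRankMax_pos Q
    have hle := pvRankMax_le Q
    by_cases h5 : p ∈ pvT5
    · rw [pvGetD_top p h5]
      have : pvRankMax (p :: Q) = 5 := by simp [pvRankMax, h5]
      rw [this]; omega
    · by_cases h4 : p ∈ pvT4
      · have h5' : p ∉ pvT5 := h5
        rw [pvGetD_4 p h4]
        have : pvRankMax (p :: Q) =
            if Q.any (fun p => decide (p ∈ pvT5)) then 5 else 4 := by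
          simp [pvRankMax, h4, h5']
        rw [this]
        by_cases hq : Q.any (fun p => decide (p ∈ pvT5)) = true
        · have : pvRankMax Q = 5 := by simp [pvRankMax, hq]
          rw [this]; simp [hq]
        · have : pvRankMax Q ≤ 4 := by
            unfold pvRankMax; rw [if_neg (by simpa using hq)]; split_ifs <;> norm_num
          simp only [hq, Bool.false_eq_true, if_false]; omega
      · by_cases h3 : p ∈ pvT3
        · rw [pvGetD_3 p h3]
          have hrw : pvRankMax (p :: Q) =
              if Q.any (fun p => decide (p ∈ pvT5)) then 5
              else if Q.any (fun p => decide (p ∈ pvT4)) then 4 else 3 := by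
            simp [pvRankMax, h3, h5, h4]
          rw [hrw]
          by_cases hq5 : Q.any (fun p => decide (p ∈ pvT5)) = true
          · have : pvRankMax Q = 5 := by simp [pvRankMax, hq5]
            rw [this]; simp [hq5]
          · by_cases hq4 : Q.any (fun p => decide (p ∈ pvT4)) = true
            · have : pvRankMax Q = 4 := by simp [pvRankMax, hq5, hq4]
              rw [this]; simp [hq5, hq4]
            · have : pvRankMax Q ≤ 3 := by
                unfold pvRankMax
                rw [if_neg (by simpa using hq5), if_neg (by simpa using hq4)]
                split_ifs <;> norm_num
              simp only [hq5, hq4, Bool.false_eq_true, if_false]; omega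
        · by_cases h2 : p ∈ pvT2
          · rw [pvGetD_2 p h2]
            have hrw : pvRankMax (p :: Q) =
                if Q.any (fun p => decide (p ∈ pvT5)) then 5
                else if Q.any (fun p => decide (p ∈ pvT4)) then 4
                else if Q.any (fun p => decide (p ∈ pvT3)) then 3 else 2 := by
              simp [pvRankMax, h2, h5, h4, h3]
            rw [hrw]
            by_cases hq5 : Q.any (fun p => decide (p ∈ pvT5)) = true
            · have : pvRankMax Q = 5 := by simp [pvRankMax, hq5]
              rw [this]; simp [hq5]
            · by_cases hq4 : Q.any (fun p => decide (p ∈ pvT4)) = true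
              · have : pvRankMax Q = 4 := by simp [pvRankMax, hq5, hq4]
                rw [this]; simp [hq5, hq4]
              · by_cases hq3 : Q.any (fun p => decide (p ∈ pvT3)) = true
                · have : pvRankMax Q = 3 := by simp [pvRankMax, hq5, hq4, hq3]
                  rw [this]; simp [hq5, hq4, hq3]
                · have : pvRankMax Q ≤ 2 := by
                    unfold pvRankMax
                    rw [if_neg (by simpa using hq5), if_neg (by simpa using hq4),
                      if_neg (by simpa using hq3)]
                    split_ifs <;> norm_num
                  simp only [hq5, hq4, hq3, Bool.false_eq_true, if_false]; omega
          · rw [pvGetD_low p h5 h4 h3 h2]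
            have hrw : pvRankMax (p :: Q) = pvRankMax Q := by
              simp [pvRankMax, h5, h4, h3, h2]
            rw [hrw]; omega

-- empty pieces belong to no tag group, so filtering them out does not change pvRankMax
lemma pvAny_filter (l T : List String) (h : ¬ ("" ∈ T)) :
    (l.filter (fun p => p != "")).any (fun p => decide (p ∈ T)) =
      l.any (fun p => decide (p ∈ T)) := by
  induction l with
  | nil => rfl
  | cons x l ih =>
    by_cases hx : x = ""
    · subst hx; simpa [h] using ih
    · simp [hx, List.any_cons, ih]

lemma pvRankMax_filter (raw : String) (l : List String) :
    pvRankMax (raw :: l.filter (fun p => p != "")) = pvRankMax (raw :: l) := by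
  unfold pvRankMax
  simp only [List.any_cons, pvAny_filter l pvT5 (by decide), pvAny_filter l pvT4 (by decide),
    pvAny_filter l pvT3 (by decide), pvAny_filter l pvT2 (by decide)]
  rfl

lemma pvParts_eq (x : String) (l : List String) :
    PySem.Set.update (PySem.Set.ofList [x]) l = PySem.Set.ofList (x :: l) := rfl

-- ===== VERDICT (by name: the statement is the Claim_ definition above) =====
theorem variant_rank_from_id_spec : Claim_equal_variant_rank_from_id := by
  intro v _
  unfold Spec_variant_rank_from_id variant_rank_from_id variant_rank_from_id_alt
  set raw := PySem.Str.replace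
      (PySem.Str.lower (PySem.Str.strip (if v = "" then "" else v))) "-" "_" with hraw
  by_cases h : raw = ""
  · simp [h]
  · simp only [if_neg h]
    set l := (PySem.Str.split? raw "_").getD [] with hl
    rw [pvParts_eq, pvALoop_eq_rankMax, pvRankMax_filter, pvFold_eq (raw :: l) 1 le_rfl]
    have := pvRankMax_pos (raw :: l)
    omega
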